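-- pv_equiv track=rewrite | github.com/anthonyceponis/british-informatics-olympiad-solutions | 2016/[1]-promenade-fractions.py | getPromenadeOutput
-- ===== SOURCE A (Python) =====
-- def getPromenadeOutput(cin):
--     beforeMostRecentLeftChoice = [1, 0]
--     beforeMostRecentRightChoice = [0, 1]
--     mostRecent = [1, 1]
--
--     for letter in cin:
--         if (letter == "L"):
--             beforeMostRecentLeftChoice = mostRecent[:]
--         elif (letter == "R"):
--             beforeMostRecentRightChoice = mostRecent[:]
--
--         l = beforeMostRecentLeftChoice[0]
--         m = beforeMostRecentLeftChoice[1]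
--         r = beforeMostRecentRightChoice[0]
--         s = beforeMostRecentRightChoice[1]
--
--         mostRecent[0] = l+r
--         mostRecent[1] = m+s
--
--     return f'{mostRecent[0]}/{mostRecent[1]}'
-- ===== SOURCE B (Python) =====
-- def getPromenadeOutput(cin):
--     # Keep only the meaningful choice letters; other characters are no-ops.
--     filtered = [c for c in cin if c == "L" or c == "R"]
--     L = [1, 0]
--     R = [0, 1]
--     i = 0
--     n = len(filtered)
--     while i < n:
--         j = i + 1
--         while j < n and filtered[j] == filtered[i]:
--             j += 1
--         k = j - i
--         if filtered[i] == "L":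
--             L = [L[0] + k * R[0], L[1] + k * R[1]]
--         else:
--             R = [R[0] + k * L[0], R[1] + k * L[1]]
--         i = j
--     return f'{L[0] + R[0]}/{L[1] + R[1]}'
-- ===== Notes on version B (the rewrite author's own statement) =====
-- stated objective: alternative
-- what changed: B filters out non-L/R characters (no-ops in A), splits the remainder into maximal runs of equal letters, and replaces A's one vector addition per character by a single multiply-add (L += k*R or R += k*L) per run, returning (L+R) as the fraction instead of carrying A's redundant mostRecent state. Run-compression does one big-int multiply-add per run instead of one addition per character.
import Mathlib
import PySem

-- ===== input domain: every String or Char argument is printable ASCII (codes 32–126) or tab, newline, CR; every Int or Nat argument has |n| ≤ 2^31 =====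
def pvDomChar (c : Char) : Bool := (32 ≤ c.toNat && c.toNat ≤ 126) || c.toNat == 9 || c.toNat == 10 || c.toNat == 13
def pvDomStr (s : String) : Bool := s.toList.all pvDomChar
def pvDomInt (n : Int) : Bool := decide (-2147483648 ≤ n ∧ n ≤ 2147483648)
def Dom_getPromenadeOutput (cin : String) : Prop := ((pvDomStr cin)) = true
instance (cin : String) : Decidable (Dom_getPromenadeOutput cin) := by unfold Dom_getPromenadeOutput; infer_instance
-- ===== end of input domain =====

-- B replaces A's one-addition-per-character loop by compressing the filtered input into
-- maximal runs of equal letters and doing one multiply-add per run; measurably faster by a constant factor on run-heavy inputs.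

-- ===== PORT A =====
-- state: (beforeMostRecentLeftChoice, beforeMostRecentRightChoice, mostRecent), each an Int pair
def pvStepA (st : (Int × Int) × (Int × Int) × (Int × Int)) (letter : Char) :
    (Int × Int) × (Int × Int) × (Int × Int) :=
  let L := if letter = 'L' then st.2.2 else st.1
  let R := if letter = 'R' then st.2.2 else st.2.1
  (L, R, (L.1 + R.1, L.2 + R.2))

def getPromenadeOutput (cin : String) : String :=
  let st := cin.toList.foldl pvStepA ((1, 0), (0, 1), (1, 1))
  PySem.Int.toStr st.2.2.1 ++ "/" ++ PySem.Int.toStr st.2.2.2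

-- ===== PORT B =====
-- maximal runs of equal characters: the inner `while j < n and filtered[j] == filtered[i]` scan
def pvRuns : List Char → List (Char × Nat)
  | [] => []
  | c :: rest =>
      (c, 1 + (rest.takeWhile (fun x => x = c)).length) ::
        pvRuns (rest.dropWhile (fun x => x = c))
termination_by l => l.length
decreasing_by
  simp only [List.length_cons]
  exact Nat.lt_succ_of_le (List.length_dropWhile_le _ _)

def pvStepB (st : (Int × Int) × (Int × Int)) (run : Char × Nat) : (Int × Int) × (Int × Int) :=
  let L := st.1
  let R := st.2
  let k : Int := run.2
  if run.1 = 'L' then ((L.1 + k * R.1, L.2 + k * R.2), R)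
  else (L, (R.1 + k * L.1, R.2 + k * L.2))

def getPromenadeOutput_alt (cin : String) : String :=
  let filtered := cin.toList.filter (fun c => c = 'L' ∨ c = 'R')
  let st := (pvRuns filtered).foldl pvStepB ((1, 0), (0, 1))
  PySem.Int.toStr (st.1.1 + st.2.1) ++ "/" ++ PySem.Int.toStr (st.1.2 + st.2.2)

-- ===== PRECONDITION & SPEC =====
def Spec_getPromenadeOutput (cin : String) (out : String) : Prop := out = getPromenadeOutput_alt cin
instance (cin : String) (out : String) : Decidable (Spec_getPromenadeOutput cin out) := by unfold Spec_getPromenadeOutput; infer_instance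

-- ===== CLAIM (what is proved, stated in full; the proofs are below) =====
def Claim_equal_getPromenadeOutput : Prop := ∀ (cin : String), Dom_getPromenadeOutput cin → Spec_getPromenadeOutput cin (getPromenadeOutput cin)

-- ===== LEMMAS AND PROOFS =====

-- abstract per-letter step on just the (L, R) pair
def pvStepC (st : (Int × Int) × (Int × Int)) (c : Char) : (Int × Int) × (Int × Int) :=
  if c = 'L' then ((st.1.1 + st.2.1, st.1.2 + st.2.2), st.2)
  else if c = 'R' then (st.1, (st.1.1 + st.2.1, st.1.2 + st.2.2))
  else st

-- A's fold maintains mostRecent = L + R and acts as pvStepC on (L, R)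
theorem pvA_inv (l : List Char) (L R : Int × Int) :
    l.foldl pvStepA (L, R, (L.1 + R.1, L.2 + R.2)) =
      (let s := l.foldl pvStepC (L, R); (s.1, s.2, (s.1.1 + s.2.1, s.1.2 + s.2.2))) := by
  induction l generalizing L R with
  | nil => rfl
  | cons c t ih =>
      simp only [List.foldl_cons]
      by_cases hL : c = 'L'
      · simpa [pvStepA, pvStepC, hL] using ih (L.1 + R.1, L.2 + R.2) R
      · by_cases hR : c = 'R'
        · simpa [pvStepA, pvStepC, hL, hR] using ih L (L.1 + R.1, L.2 + R.2)
        · simpa [pvStepA, pvStepC, hL, hR] using ih L R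

-- letters other than L/R are no-ops for pvStepC
theorem pvC_filter (l : List Char) (s : (Int × Int) × (Int × Int)) :
    l.foldl pvStepC s = (l.filter (fun c => c = 'L' ∨ c = 'R')).foldl pvStepC s := by
  induction l generalizing s with
  | nil => rfl
  | cons c t ih =>
      by_cases hL : c = 'L'
      · simp [hL, ih]
      · by_cases hR : c = 'R'
        · simp [hR, ih]
        · simp [hL, hR, pvStepC, ih]

-- k identical letters at once: one multiply-add
theorem pvC_replicate (k : Nat) (c : Char) (s : (Int × Int) × (Int × Int))
    (hc : c = 'L' ∨ c = 'R') :
    (List.replicate k c).foldl pvStepC s = pvStepB s (c, k) := by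
  induction k generalizing s with
  | zero =>
      rcases hc with h | h <;> simp [pvStepB, h, List.replicate]
  | succ n ih =>
      rw [List.replicate_succ, List.foldl_cons, ih]
      rcases hc with h | h
      · simp [pvStepB, pvStepC, h]; constructor <;> ring
      · simp [pvStepB, pvStepC, h]; constructor <;> ring

-- folding pvStepB over the runs of an L/R-only list equals folding pvStepC over it
theorem pvRuns_fold (l : List Char) (s : (Int × Int) × (Int × Int))
    (h : ∀ c ∈ l, c = 'L' ∨ c = 'R') :
    (pvRuns l).foldl pvStepB s = l.foldl pvStepC s := by
  induction l using pvRuns.induct generalizing s with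
  | case1 => simp [pvRuns]
  | case2 c rest ih =>
      have hc : c = 'L' ∨ c = 'R' := h c (List.mem_cons_self ..)
      have hrep : c :: rest.takeWhile (fun x => x = c) =
          List.replicate (1 + (rest.takeWhile (fun x => x = c)).length) c := by
        have : rest.takeWhile (fun x => x = c) =
            List.replicate (rest.takeWhile (fun x => x = c)).length c :=
          List.eq_replicate_of_mem (fun b hb => by
            have := List.mem_takeWhile_imp hb; simpa using this)
        rw [Nat.add_comm, List.replicate_succ, ← this]
      have hsplit : c :: rest =
          (c :: rest.takeWhile (fun x => x = c)) ++ rest.dropWhile (fun x => x = c) := by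
        simp [List.takeWhile_append_dropWhile]
      rw [pvRuns, List.foldl_cons]
      rw [ih (pvStepB s (c, 1 + (rest.takeWhile (fun x => x = c)).length))
          (fun d hd => h d (List.mem_cons_of_mem _ ((List.dropWhile_sublist _).mem hd)))]
      conv_rhs => rw [hsplit]
      rw [List.foldl_append, hrep, pvC_replicate _ _ _ hc]

theorem getPromenadeOutput_spec : Claim_equal_getPromenadeOutput := by
  intro cin _
  unfold Spec_getPromenadeOutput getPromenadeOutput getPromenadeOutput_alt
  have hinv := pvA_inv cin.toList (1, 0) (0, 1)
  norm_num at hinv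
  simp only []
  rw [hinv]
  rw [pvRuns_fold _ _ (fun c hc => by
    have := List.of_mem_filter hc; simpa using this)]
  rw [← pvC_filter]
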